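-- pv_equiv track=rewrite | github.com/glemvik/Project_euler | 078_coin_partitions.py | number_of_summations
-- ===== SOURCE A (Python) =====
-- from collections import defaultdict
--
-- def number_of_summations(divisor):
--     """
--     Returns the number of different ways 'number' can be written as a sum of
--     at least two positive integers.
--     """
--
--     summations = defaultdict(lambda : 1)
--
--     for col in range(2,int(10e10)):
--         for row in range(2,col+1):
--
--             if col == row:
--                 summations[(row,col)] = summations[(row-1,col)] + 1
--
--
--                 if summations[(row,col)] % divisor == 0:
--                     return (row,col), summations[(row,col)]
--
--             elif col > row:
--
--                 summations[(row,col)] = summations[(row-1,col)] + summations[(min(col-row,row),col-row)]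
-- ===== SOURCE B (Python) =====
-- def number_of_summations(divisor):
--     """
--     First n >= 2 whose partition number p(n) is divisible by divisor;
--     returns ((n, n), p(n)) like the original.
--
--     Batch bottom-up coin DP: compute p(0..limit) in a flat list with the
--     classic parts-outer / amounts-inner loop, scan it for a divisible
--     entry, and double the limit until one is found (searching the same
--     range n < 10**11 as the original).
--     """
--     cap = 10**11 - 1
--     limit = 2
--     while True:
--         ways = [1] + [0] * limit
--         for k in range(1, limit + 1):
--             for j in range(k, limit + 1):
--                 ways[j] += ways[j - k]
--         for n in range(2, limit + 1):
--             if ways[n] % divisor == 0: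
--                 return (n, n), ways[n]
--         if limit >= cap:
--             return None
--         limit = min(2 * limit, cap)
-- ===== Notes on version B (the rewrite author's own statement) =====
-- stated objective: faster
-- what changed: Replaces the incremental 2-D defaultdict table keyed by (row,col) tuples with a flat 1-D coins DP (parts-outer/amounts-inner, in-place list) recomputed under a doubling search limit, scanning the array for the first partition number divisible by divisor. Intended as faster; a timing run measured B several times faster at the largest size both versions finished (unconfirmed where both time out).
-- outside the precondition, e.g. on number_of_summations(0): A raises ZeroDivisionError, B raises ZeroDivisionError
import Mathlib
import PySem

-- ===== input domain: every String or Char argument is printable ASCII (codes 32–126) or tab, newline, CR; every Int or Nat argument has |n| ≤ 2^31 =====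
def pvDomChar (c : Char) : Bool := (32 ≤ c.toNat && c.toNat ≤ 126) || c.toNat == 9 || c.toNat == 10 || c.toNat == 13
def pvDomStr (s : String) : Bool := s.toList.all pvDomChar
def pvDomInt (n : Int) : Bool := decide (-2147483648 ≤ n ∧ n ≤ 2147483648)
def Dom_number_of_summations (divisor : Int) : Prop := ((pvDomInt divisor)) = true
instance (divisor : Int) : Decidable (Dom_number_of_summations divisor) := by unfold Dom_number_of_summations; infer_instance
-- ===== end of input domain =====

-- B replaces A's incremental 2-D defaultdict-of-tuples table by a flat 1-D coins DP under a
-- doubling search limit; intended as faster (a timing run measured B several times faster at the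
-- largest size both versions finished).  A mutates only its own local dict.

-- ===== PORT A =====
-- A's defaultdict maps keys (row, col) with 2 ≤ row ≤ col, and writes them in EXACTLY
-- lexicographic order ((2,2); (2,3),(3,3); (2,4),… — every column is completed before the next
-- starts, and the only return happens after the last write of a column).  The port therefore
-- stores the dict as the flat append-only array of its values in write order: key (row, col)
-- lives at index tri col + (row - 2), where tri c counts the keys of all columns before c.
-- A read of a missing key (row < 2, col < 2, or a slot not yet written — defaultdict(lambda: 1))
-- yields the default 1.  Value-for-value this is exactly A's dict.
def tri (c : Nat) : Nat := (c - 1) * (c - 2) / 2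

def dGet (t : Array Int) (r c : Int) : Int :=
  if r < 2 ∨ c < 2 then 1 else t.getD (tri c.toNat + (r.toNat - 2)) 1

-- one iteration of 'for row in range(2, col+1)' (early return carried through Sum)
def aRowStep (divisor col : Int) (acc : Sum (Array Int) ((Int × Int) × Int)) (row : Int) :
    Sum (Array Int) ((Int × Int) × Int) :=
  match acc with
  | .inr r => .inr r
  | .inl t =>
    if row == col then
      let v := dGet t (row - 1) col + 1
      let t' := t.push v
      if PySem.Int.mod v divisor == 0 then .inr ((row, col), v) else .inl t'
    else if col > row then
      .inl (t.push (dGet t (row - 1) col + dGet t (min (col - row) row) (col - row)))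
    else .inl t

-- 'for col in range(2, int(10e10))': 99999999998 iterations, col starting at 2; if the loop
-- ever ran dry Python would return None, which is no value of the declared type — the port
-- returns ((0,0),0) there.
def aLoop (divisor : Int) : Nat → Int → Array Int → (Int × Int) × Int
  | 0, _, _ => ((0, 0), 0)
  | fuel + 1, col, t =>
    match (PySem.List.pyRange 2 (col + 1) 1).foldl (aRowStep divisor col) (.inl t) with
    | .inr r => r
    | .inl t' => aLoop divisor fuel (col + 1) t'

def number_of_summations (divisor : Int) : (Int × Int) × Int :=
  aLoop divisor 99999999998 2 #[]

-- ===== PORT B =====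
-- 'for j in range(k, limit+1): ways[j] += ways[j-k]' — the Python list is ported as an Array;
-- every index is in range, so reads are getD and writes setIfInBounds.
def bInner (k limit : Nat) (ways : Array Int) : Array Int :=
  (List.range' k (limit + 1 - k)).foldl
    (fun ws j => ws.setIfInBounds j (ws.getD j 0 + ws.getD (j - k) 0)) ways

-- ways = [1] + [0]*limit, then the coins loop 'for k in range(1, limit+1)'
def bWays (limit : Nat) : Array Int :=
  (List.range' 1 limit).foldl (fun ws k => bInner k limit ws)
    (#[(1 : Int)] ++ Array.replicate limit 0)

-- 'for n in range(2, limit+1): if ways[n] % divisor == 0: return (n,n), ways[n]'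
def bScan (divisor : Int) (ways : Array Int) : List Nat → Option ((Int × Int) × Int)
  | [] => none
  | n :: rest =>
    if PySem.Int.mod (ways.getD n 0) divisor == 0 then
      some (((n : Int), (n : Int)), ways.getD n 0)
    else bScan divisor ways rest

-- the 'while True' doubling loop; cap = 10**11 - 1.  Source B returns None when the whole range is
-- searched without a hit — no value of the declared type; the port returns ((0,0),0) there.
def bLoop (divisor : Int) : Nat → Nat → (Int × Int) × Int
  | 0, _ => ((0, 0), 0)
  | fuel + 1, limit =>
    match bScan divisor (bWays limit) (List.range' 2 (limit - 1)) with
    | some r => r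
    | none =>
      if 99999999999 ≤ limit then ((0, 0), 0)
      else bLoop divisor fuel (min (2 * limit) 99999999999)

-- fuel 40 suffices: the doubling limits reach the cap 10**11 - 1 < 2*2^39 within 40 rounds
def number_of_summations_alt (divisor : Int) : (Int × Int) × Int := bLoop divisor 40 2

-- ===== PRECONDITION & SPEC =====
-- Pre_ excludes only divisor = 0, on which Python A (and B) raises ZeroDivisionError.
def Pre_number_of_summations (divisor : Int) : Prop := divisor ≠ 0
instance (divisor : Int) : Decidable (Pre_number_of_summations divisor) := by unfold Pre_number_of_summations; infer_instance
def pvWitness_number_of_summations : Int := 2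

def Spec_number_of_summations (divisor : Int) (out : (Int × Int) × Int) : Prop := out = number_of_summations_alt divisor
instance (divisor : Int) (out : (Int × Int) × Int) : Decidable (Spec_number_of_summations divisor out) := by unfold Spec_number_of_summations; infer_instance

-- ===== CLAIM (what is proved, stated in full; the proofs are below) =====
def Claim_equal_number_of_summations : Prop := ∀ (divisor : Int), Dom_number_of_summations divisor → Pre_number_of_summations divisor → Spec_number_of_summations divisor (number_of_summations divisor)

-- ===== LEMMAS AND PROOFS =====

-- p(n,k) = number of partitions of n into parts ≤ k (the quantity both programs tabulate)
def part : Nat → Nat → Nat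
  | n, 0 => if n = 0 then 1 else 0
  | n, k + 1 => part n k + if k + 1 ≤ n then part (n - (k + 1)) (k + 1) else 0
termination_by n k => (n, k)
decreasing_by
  · exact Prod.Lex.right n (Nat.lt_succ_self k)
  · exact Prod.Lex.left _ _ (by omega)

lemma part_succ (n k : Nat) :
    part n (k + 1) = part n k + if k + 1 ≤ n then part (n - (k + 1)) (k + 1) else 0 := by
  rw [part]

lemma part_zero_left (k : Nat) : part 0 k = 1 := by
  induction k with
  | zero => simp [part]
  | succ k ih => rw [part_succ]; simp [ih]

lemma part_add (n j : Nat) : part n (n + j) = part n n := by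
  induction j with
  | zero => rfl
  | succ j ih =>
    rw [(by omega : n + (j + 1) = (n + j) + 1), part_succ]
    have hnot : ¬ (n + j + 1 ≤ n) := by omega
    simp [hnot, ih]

lemma part_of_le (n k : Nat) (h : n ≤ k) : part n k = part n n := by
  obtain ⟨j, rfl⟩ := Nat.le.dest h
  exact part_add n j

lemma part_one (n : Nat) : part n 1 = 1 := by
  induction n with
  | zero => exact part_zero_left 1
  | succ n ih => rw [part_succ]; simp [part, ih]

lemma part_lt_eq (i k : Nat) (h : i < k) : part i k = part i (k - 1) := by
  rw [part_of_le i k (by omega), part_of_le i (k-1) (by omega)]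

lemma part_diag (n : Nat) (h : 1 ≤ n) : part n n = part n (n - 1) + 1 := by
  have h0 := part_succ n (n - 1)
  rw [(by omega : (n - 1) + 1 = n)] at h0
  rw [h0]
  simp [part_zero_left]

-- the hit test both programs perform at n, and the common search both loops implement
def hit (divisor : Int) (n : Nat) : Bool :=
  PySem.Int.mod ((part n n : Nat) : Int) divisor == 0

def searchO (divisor : Int) : Nat → Nat → Option ((Int × Int) × Int)
  | 0, _ => none
  | f + 1, n =>
    if hit divisor n then some (((n : Int), (n : Int)), ((part n n : Nat) : Int))
    else searchO divisor f (n + 1)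

lemma searchO_mono (d : Int) : ∀ f f' n r, searchO d f n = some r → f ≤ f' →
    searchO d f' n = some r := by
  intro f
  induction f with
  | zero => intro f' n r h; simp [searchO] at h
  | succ f ih =>
    intro f' n r h hle
    obtain ⟨f'', rfl⟩ : ∃ f'', f' = f'' + 1 := ⟨f' - 1, by omega⟩
    rw [searchO] at h ⊢
    by_cases hh : hit d n
    · simpa [hh] using h
    · simp only [hh, Bool.false_eq_true, if_false] at h ⊢
      exact ih f'' (n + 1) r h (by omega)

-- ---------- Array reads and writes ----------

lemma arr_getD_set (a : Array Int) (j : Nat) (v : Int) (i : Nat) (d : Int) :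
    (a.setIfInBounds j v).getD i d = if j = i ∧ j < a.size then v else a.getD i d := by
  rw [Array.getD_eq_getD_getElem?, Array.getD_eq_getD_getElem?, Array.getElem?_setIfInBounds]
  split
  · rename_i hji
    subst hji
    split
    · rw [if_pos ⟨rfl, by assumption⟩]; rfl
    · rw [if_neg (by tauto), Array.getElem?_eq_none (by omega)]
  · rw [if_neg (by tauto)]

lemma arr_getD_push (a : Array Int) (v : Int) (i : Nat) (d : Int) :
    (a.push v).getD i d = if i = a.size then v else a.getD i d := by
  rw [Array.getD_eq_getD_getElem?, Array.getD_eq_getD_getElem?, Array.getElem?_push]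
  split <;> rfl

-- ---------- A side ----------

lemma tri_succ (c : Nat) : tri (c + 1) = tri c + (c - 1) := by
  unfold tri
  cases c with
  | zero => rfl
  | succ k =>
    rw [(by omega : k + 1 + 1 - 1 = k + 1), (by omega : k + 1 + 1 - 2 = k),
      (by omega : k + 1 - 2 = k - 1), (by omega : k + 1 - 1 = k),
      (by cases k with
      | zero => rfl
      | succ j => simp only [Nat.add_sub_cancel]; ring : (k + 1) * k = k * (k - 1) + k * 2),
      Nat.add_mul_div_right _ _ (by norm_num : 0 < 2)]

lemma tri_mono (c c' : Nat) (h : c ≤ c') : tri c ≤ tri c' := by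
  induction c' with
  | zero => simp_all
  | succ c' ih =>
    rcases Nat.lt_or_ge c (c' + 1) with h1 | h1
    · calc tri c ≤ tri c' := ih (by omega)
        _ ≤ tri (c' + 1) := by rw [tri_succ]; omega
    · rw [(by omega : c = c' + 1)]

lemma idx_lt_tri (r c n : Nat) (hr : 2 ≤ r) (hrc : r ≤ c) (hc : c < n) :
    tri c + (r - 2) < tri n := by
  have h1 : tri c + (r - 2) < tri (c + 1) := by rw [tri_succ]; omega
  have h2 : tri (c + 1) ≤ tri n := tri_mono _ _ (by omega)
  omega

-- reading A's table: the default 1 for row 1 (and for column 1) is part c 1 = part 1 1 = 1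
lemma dGet_eq (n m : Nat) (t : Array Int) (_hsz : t.size = tri n + (m - 2))
    (hval : ∀ r c : Nat, 2 ≤ r → r ≤ c → (c < n ∨ (c = n ∧ r < m)) →
      t.getD (tri c + (r - 2)) 1 = ((part c r : Nat) : Int))
    (r c : Nat) (hr : 1 ≤ r) (hrc : r ≤ c)
    (hcase : c < n ∨ (c = n ∧ r < m)) :
    dGet t ((r : Nat) : Int) ((c : Nat) : Int) = ((part c r : Nat) : Int) := by
  rcases Nat.lt_or_ge r 2 with h1 | h2
  · have hr1 : r = 1 := by omega
    subst hr1
    rw [dGet, if_pos (by norm_num), part_one]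
    rfl
  · rw [dGet, if_neg (by omega), Int.toNat_natCast, Int.toNat_natCast]
    exact hval r c h2 hrc hcase

lemma aRows (d : Int) (n : Nat) (_hn : 2 ≤ n) (t0 : Array Int)
    (hsz0 : t0.size = tri n)
    (hval0 : ∀ r c : Nat, 2 ≤ r → r ≤ c → c < n →
      t0.getD (tri c + (r - 2)) 1 = ((part c r : Nat) : Int)) :
    ∀ m, 2 ≤ m → m ≤ n →
    ∃ t, (PySem.List.pyRange 2 (m : Int) 1).foldl (aRowStep d (n : Int)) (.inl t0) = .inl t ∧
      t.size = tri n + (m - 2) ∧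
      (∀ r c : Nat, 2 ≤ r → r ≤ c → (c < n ∨ (c = n ∧ r < m)) →
        t.getD (tri c + (r - 2)) 1 = ((part c r : Nat) : Int)) := by
  intro m hm2
  induction m, hm2 using Nat.le_induction with
  | base =>
    intro _
    refine ⟨t0, ?_, by omega, fun r c hr hrc hcase => ?_⟩
    · rw [(by norm_num : ((2 : Nat) : Int) = (2 : Int)),
        PySem.List.pyRange_one_eq_nil (le_refl 2), List.foldl_nil]
    · rcases hcase with hc | ⟨_, hrm⟩
      · exact hval0 r c hr hrc hc
      · omega
  | succ m hm ih =>
    intro hmn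
    obtain ⟨t, hfold, hsz, hval⟩ := ih (by omega)
    have hcast : ((m + 1 : Nat) : Int) = (m : Int) + 1 := by push_cast; ring
    have hsplit : PySem.List.pyRange 2 ((m : Int) + 1) 1 =
        PySem.List.pyRange 2 (m : Int) 1 ++ [(m : Int)] :=
      PySem.List.pyRange_one_succ_right (by exact_mod_cast hm)
    rw [hcast, hsplit, List.foldl_append, hfold, List.foldl_cons, List.foldl_nil]
    -- the elif branch: row = m < n = col
    have hmltn : m < n := by omega
    have hbeq : (((m : Nat) : Int) == ((n : Nat) : Int)) = false := by
      rw [beq_eq_false_iff_ne]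
      intro hc
      exact absurd (by exact_mod_cast hc) (by omega)
    have hgt : ((n : Nat) : Int) > ((m : Nat) : Int) := by exact_mod_cast hmltn
    have e1 : ((m : Nat) : Int) - 1 = ((m - 1 : Nat) : Int) := by omega
    have e2 : ((n : Nat) : Int) - ((m : Nat) : Int) = ((n - m : Nat) : Int) := by omega
    have r1 : dGet t (((m - 1 : Nat) : Int)) (((n : Nat) : Int)) =
        ((part n (m - 1) : Nat) : Int) :=
      dGet_eq n m t hsz hval (m - 1) n (by omega) (by omega) (Or.inr ⟨rfl, by omega⟩)
    have r2 : dGet t (((min (n - m) m : Nat) : Int)) (((n - m : Nat) : Int)) =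
        ((part (n - m) m : Nat) : Int) := by
      have base := dGet_eq n m t hsz hval (min (n - m) m) (n - m) (by omega)
        (min_le_left _ _) (Or.inl (by omega))
      rw [base]
      rcases le_total m (n - m) with hle | hle
      · rw [min_eq_right hle]
      · rw [min_eq_left hle, part_of_le (n - m) m hle]
    have hval' : dGet t (((m : Nat) : Int) - 1) ((n : Nat) : Int) +
        dGet t (min (((n : Nat) : Int) - ((m : Nat) : Int)) ((m : Nat) : Int))
          (((n : Nat) : Int) - ((m : Nat) : Int)) = ((part n m : Nat) : Int) := by
      rw [e1, e2, (by push_cast; rfl :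
        min (((n - m : Nat) : Int)) (((m : Nat) : Int)) = ((min (n - m) m : Nat) : Int)),
        r1, r2]
      have h3 := part_succ n (m - 1)
      rw [(by omega : (m - 1) + 1 = m), if_pos (by omega)] at h3
      rw [h3]
      push_cast
      ring
    refine ⟨t.push (dGet t (((m : Nat) : Int) - 1) ((n : Nat) : Int) +
        dGet t (min (((n : Nat) : Int) - ((m : Nat) : Int)) ((m : Nat) : Int))
          (((n : Nat) : Int) - ((m : Nat) : Int))), ?_, ?_, ?_⟩
    · rw [aRowStep]
      simp only [hbeq, Bool.false_eq_true, if_false, if_pos hgt]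
    · rw [Array.size_push]; omega
    · intro r c hr hrc hcase
      rw [hval', arr_getD_push]
      rcases hcase with hc | ⟨rfl, hrm⟩
      · rw [if_neg (by
          have := idx_lt_tri r c n hr hrc hc
          have := tri_mono n n (le_refl n)
          omega)]
        exact hval r c hr hrc (Or.inl hc)
      · rcases Nat.lt_or_ge r m with hrm' | hrm'
        · rw [if_neg (by omega)]
          exact hval r c hr hrc (Or.inr ⟨rfl, hrm'⟩)
        · have hrm'' : r = m := by omega
          subst hrm''
          rw [if_pos (by omega)]

lemma aLoop_eq (d : Int) : ∀ fuel (n : Nat) t, 2 ≤ n → t.size = tri n →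
    (∀ r c : Nat, 2 ≤ r → r ≤ c → c < n →
      t.getD (tri c + (r - 2)) 1 = ((part c r : Nat) : Int)) →
    aLoop d fuel (n : Int) t = (searchO d fuel n).getD ((0, 0), 0) := by
  intro fuel
  induction fuel with
  | zero => intro n t _ _ _; rfl
  | succ fuel ih =>
    intro n t hn hsz hval
    obtain ⟨t', hfold, hsz', hval'⟩ :=
      aRows d n hn t hsz hval n (by omega) (le_refl n)
    rw [aLoop, (by push_cast; ring : ((n : Nat) : Int) + 1 = ((n + 1 : Nat) : Int)),
      (by push_cast; ring : ((n + 1 : Nat) : Int) = ((n : Nat) : Int) + 1),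
      PySem.List.pyRange_one_succ_right (by exact_mod_cast hn : (2:Int) ≤ (n : Int)),
      List.foldl_append, hfold, List.foldl_cons, List.foldl_nil, aRowStep]
    have hbeq : (((n : Nat) : Int) == ((n : Nat) : Int)) = true := by
      rw [beq_iff_eq]
    have e1 : ((n : Nat) : Int) - 1 = ((n - 1 : Nat) : Int) := by omega
    have r1 : dGet t' (((n : Nat) : Int) - 1) ((n : Nat) : Int) + 1 =
        ((part n n : Nat) : Int) := by
      rw [e1, dGet_eq n n t' hsz' hval' (n - 1) n (by omega) (by omega)
          (Or.inr ⟨rfl, by omega⟩),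
        part_diag n (by omega)]
      push_cast
      ring
    simp only [hbeq, if_true, r1]
    rw [searchO]
    unfold hit
    cases hhit : (PySem.Int.mod ((part n n : Nat) : Int) d == 0) with
    | true => rfl
    | false =>
      simp only [Bool.false_eq_true, if_false]
      rw [(by push_cast; ring : ((n : Nat) : Int) + 1 = ((n + 1 : Nat) : Int))]
      apply ih (n + 1) _ (by omega)
      · rw [Array.size_push, hsz', tri_succ (c := n)]
        omega
      · intro r c hr hrc hc
        rw [arr_getD_push]
        rcases Nat.lt_or_ge c n with hcn | hcn
        · rw [if_neg (by
            have := idx_lt_tri r c n hr hrc hcn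
            omega)]
          exact hval' r c hr hrc (Or.inl hcn)
        · have hcn' : c = n := by omega
          subst hcn'
          rcases Nat.lt_or_ge r c with hrn | hrn
          · rw [if_neg (by omega)]
            exact hval' r c hr hrc (Or.inr ⟨rfl, hrn⟩)
          · have : r = c := by omega
            subst this
            rw [if_pos (by omega)]

-- ---------- B side ----------

lemma bInnerGo (k limit : Nat) (hk : 1 ≤ k) :
    ∀ c s ws, k ≤ s → s + c = limit + 1 → ws.size = limit + 1 →
    (∀ i, i ≤ limit → ws.getD i 0 =
      if i < s then ((part i k : Nat) : Int) else ((part i (k - 1) : Nat) : Int)) →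
    ((List.range' s c).foldl
        (fun (ws : Array Int) (j : Nat) =>
          ws.setIfInBounds j (ws.getD j 0 + ws.getD (j - k) 0)) ws).size = limit + 1 ∧
    ∀ i, i ≤ limit → ((List.range' s c).foldl
        (fun (ws : Array Int) (j : Nat) =>
          ws.setIfInBounds j (ws.getD j 0 + ws.getD (j - k) 0)) ws).getD i 0 =
      ((part i k : Nat) : Int) := by
  intro c
  induction c with
  | zero =>
    intro s ws hks hsc hlen hinv
    refine ⟨hlen, fun i hi => ?_⟩
    have := hinv i hi
    rwa [if_pos (by omega)] at this
  | succ c ih =>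
    intro s ws hks hsc hlen hinv
    rw [List.range'_succ, List.foldl_cons]
    have hslt : s < ws.size := by omega
    have hv : ws.getD s 0 + ws.getD (s - k) 0 = ((part s k : Nat) : Int) := by
      have h1 := hinv s (by omega)
      rw [if_neg (by omega)] at h1
      have h2 := hinv (s - k) (by omega)
      rw [if_pos (by omega)] at h2
      have h3 := part_succ s (k - 1)
      rw [(by omega : (k - 1) + 1 = k), if_pos (by omega)] at h3
      rw [h1, h2, h3]
      push_cast
      ring
    apply ih (s + 1) _ (by omega) (by omega) (by simp [hlen])
    intro i hi
    rw [arr_getD_set]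
    rcases Nat.lt_trichotomy i s with h | h | h
    · rw [if_neg (by omega), if_pos (by omega)]
      have := hinv i hi
      rwa [if_pos (by omega)] at this
    · subst h
      rw [if_pos ⟨rfl, hslt⟩, if_pos (by omega)]
      exact hv
    · rw [if_neg (by omega), if_neg (by omega)]
      have := hinv i hi
      rwa [if_neg (by omega)] at this

lemma bWaysGo (limit : Nat) : ∀ t, t ≤ limit →
    ((List.range' 1 t).foldl (fun ws k => bInner k limit ws)
        (#[(1 : Int)] ++ Array.replicate limit 0)).size = limit + 1 ∧
    ∀ i, i ≤ limit → ((List.range' 1 t).foldl (fun ws k => bInner k limit ws)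
        (#[(1 : Int)] ++ Array.replicate limit 0)).getD i 0 = ((part i t : Nat) : Int) := by
  intro t
  induction t with
  | zero =>
    intro _
    rw [List.range'_zero]
    simp only [List.foldl_nil]
    refine ⟨by simp [Nat.add_comm], fun i hi => ?_⟩
    rw [Array.getD_eq_getD_getElem?]
    cases i with
    | zero => simp [part]
    | succ i =>
      rw [Array.getElem?_append_right (by simp), part]
      have hsz1 : (#[(1 : Int)] : Array Int).size = 1 := rfl
      rw [hsz1, Nat.add_sub_cancel, Array.getElem?_replicate]
      split <;> simp_all
  | succ t ih =>
    intro hle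
    have ih' := ih (by omega)
    rw [List.range'_concat, List.foldl_append, List.foldl_cons, List.foldl_nil]
    simp only [one_mul]
    have := bInnerGo (1 + t) limit (by omega) (limit + 1 - (1 + t)) (1 + t) _
      (le_refl _) (by omega) ih'.1 ?_
    · refine ⟨this.1, fun i hi => ?_⟩
      rw [(by omega : t + 1 = 1 + t)]
      exact this.2 i hi
    · intro i hi
      have h0 := ih'.2 i hi
      split
      · rw [h0, part_lt_eq i (1 + t) (by omega), (by omega : 1 + t - 1 = t)]
      · rw [h0, (by omega : 1 + t - 1 = t)]

lemma bWays_spec (limit : Nat) :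
    ∀ i, i ≤ limit → (bWays limit).getD i 0 = ((part i limit : Nat) : Int) := by
  exact (bWaysGo limit limit (le_refl _)).2

lemma bScan_eq (d : Int) (limit : Nat) : ∀ c s, 2 ≤ s → s + c ≤ limit + 1 →
    bScan d (bWays limit) (List.range' s c) = searchO d c s := by
  intro c
  induction c with
  | zero => intro s _ _; rfl
  | succ c ih =>
    intro s hs hsc
    rw [List.range'_succ, bScan, searchO]
    have hget : (bWays limit).getD s 0 = ((part s s : Nat) : Int) := by
      rw [bWays_spec limit s (by omega), part_of_le s limit (by omega)]
    rw [hget]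
    unfold hit
    split
    · rfl
    · exact ih (s + 1) (by omega) (by omega)

lemma bLoop_eq (d : Int) : ∀ f limit, 2 ≤ limit → limit ≤ 99999999999 →
    2 * 99999999999 ≤ limit * 2 ^ f →
    bLoop d (f + 1) limit = (searchO d 99999999998 2).getD ((0, 0), 0) := by
  intro f
  induction f with
  | zero => intro limit h2 hcap hpow; simp at hpow; omega
  | succ f ih =>
    intro limit h2 hcap hpow
    rw [bLoop]
    have hscan : bScan d (bWays limit) (List.range' 2 (limit - 1)) =
        searchO d (limit - 1) 2 := bScan_eq d limit (limit - 1) 2 (le_refl _) (by omega)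
    rw [hscan]
    cases hres : searchO d (limit - 1) 2 with
    | some r =>
      have := searchO_mono d (limit - 1) 99999999998 2 r hres (by omega)
      rw [this]
      rfl
    | none =>
      simp only
      split
      · have hl : limit = 99999999999 := by omega
        rw [hl] at hres
        rw [(by norm_num : (99999999999 : Nat) - 1 = 99999999998)] at hres
        rw [hres]
        rfl
      · rename_i hlt
        have hlt' : limit < 99999999999 := by omega
        by_cases hm : 2 * limit ≤ 99999999999
        · rw [min_eq_left hm]
          exact ih (2 * limit) (by omega) hm
            (by rw [pow_succ] at hpow; calc 2 * 99999999999 ≤ limit * (2 ^ f * 2) := hpow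
                _ = 2 * limit * 2 ^ f := by ring)
        · rw [min_eq_right (by omega)]
          have hf : 1 ≤ f := by
            by_contra hf0
            have : f = 0 := by omega
            subst this
            simp at hpow
            omega
          apply ih 99999999999 (by omega) (le_refl _)
          calc 2 * 99999999999 ≤ 99999999999 * 2 := by omega
            _ ≤ 99999999999 * 2 ^ f := by
                have : (2:Nat) ≤ 2 ^ f := by
                  calc (2:Nat) = 2 ^ 1 := by norm_num
                    _ ≤ 2 ^ f := Nat.pow_le_pow_right (by norm_num) hf
                exact Nat.mul_le_mul_left _ this

-- ===== VERDICT (by name: the statement is the Claim_ definition above) =====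
theorem number_of_summations_spec : Claim_equal_number_of_summations := by
  intro d _ _
  unfold Spec_number_of_summations number_of_summations number_of_summations_alt
  have hA := aLoop_eq d 99999999998 2 #[] (by norm_num) (by simp [tri])
    (by intro r c hr hrc hc; omega)
  have hB := bLoop_eq d 39 2 (by norm_num) (by norm_num) (by norm_num)
  rw [(by norm_num : ((2 : Nat) : Int) = (2 : Int))] at hA
  rw [hA, (by norm_num : (40 : Nat) = 39 + 1), hB]
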